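-- pv_equiv track=rewrite | github.com/truegoodcraft/business_project | tgc/health.py | _compact_detail
-- ===== SOURCE A (Python) =====
-- from typing import Dict, Iterable, List, Optional, Tuple
--
-- def _compact_detail(detail: str, status: str) -> str:
--     if not detail:
--         return ""
--     segments = [segment.strip() for segment in detail.split(";") if segment.strip()]
--     summary: Optional[str] = None
--     fix: Optional[str] = None
--     elapsed: Optional[str] = None
--     for segment in segments:
--         lowered = segment.lower()
--         if lowered.startswith("fix:"):
--             fix = segment.split(":", 1)[1].strip() if ":" in segment else segment[4:].strip()
--             continue
--         if lowered.startswith("elapsed"):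
--             elapsed = segment.split(" ", 1)[1].strip() if " " in segment else segment
--             continue
--         if summary is None:
--             summary = segment
--     detail_text = fix if status != "READY" and fix else summary
--     parts: List[str] = []
--     if detail_text:
--         parts.append(f"({detail_text})")
--     if elapsed:
--         parts.append(elapsed)
--     return " ".join(parts).strip()
-- ===== SOURCE B (Python) =====
-- def _compact_detail(detail: str, status: str) -> str:
--     if not detail:
--         return ""
--     segments = [s.strip() for s in detail.split(";") if s.strip()]
--     fix = next((s.split(":", 1)[1].strip()
--                 for s in reversed(segments) if s.lower().startswith("fix:")), None)
--     elapsed = next((s.split(" ", 1)[1].strip() if " " in s else s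
--                     for s in reversed(segments) if s.lower().startswith("elapsed")), None)
--     summary = next((s for s in segments
--                     if not s.lower().startswith("fix:")
--                     and not s.lower().startswith("elapsed")), None)
--     detail_text = fix if status != "READY" and fix else summary
--     parts = []
--     if detail_text:
--         parts.append(f"({detail_text})")
--     if elapsed:
--         parts.append(elapsed)
--     return " ".join(parts).strip()
-- ===== Notes on version B (the rewrite author's own statement) =====
-- stated objective: simpler
-- what changed: A's single stateful loop carrying summary/fix/elapsed is replaced by independent per-field scans over the segments list: last matching segment for fix and elapsed (via reversed + next), first non-field segment for summary; the formatting tail is unchanged.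
import Mathlib
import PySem

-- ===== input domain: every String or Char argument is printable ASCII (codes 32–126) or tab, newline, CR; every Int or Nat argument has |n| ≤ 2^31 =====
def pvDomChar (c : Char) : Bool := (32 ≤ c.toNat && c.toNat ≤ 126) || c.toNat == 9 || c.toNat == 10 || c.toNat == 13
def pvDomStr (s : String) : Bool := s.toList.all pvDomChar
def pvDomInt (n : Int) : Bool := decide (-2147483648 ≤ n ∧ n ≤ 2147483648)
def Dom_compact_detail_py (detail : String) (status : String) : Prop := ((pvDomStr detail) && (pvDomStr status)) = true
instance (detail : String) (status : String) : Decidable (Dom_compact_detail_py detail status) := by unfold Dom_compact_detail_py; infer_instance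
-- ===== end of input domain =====

-- B replaces A's single stateful loop by per-field scans over the segments list
-- (last match for fix/elapsed via reversed, first non-field segment for summary); simpler decomposition, same result.

-- ===== PORT A =====
-- one fold over the segments carrying (summary, fix, elapsed), exactly A's loop
def pvStepA (st : Option String × Option String × Option String) (seg : String) :
    Option String × Option String × Option String :=
  -- 'lowered = seg.lower()' inlined at its two use sites
  if PySem.Str.startswith (PySem.Str.lower seg) "fix:" then
    (st.1,
     some (if PySem.Str.isIn ":" seg
           then PySem.Str.strip (((PySem.Str.splitMax? seg ":" 1).getD []).getD 1 "")
           else PySem.Str.strip (PySem.Str.slice seg (some 4) none)),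
     st.2.2)
  else if PySem.Str.startswith (PySem.Str.lower seg) "elapsed" then
    (st.1, st.2.1,
     some (if PySem.Str.isIn " " seg
           then PySem.Str.strip (((PySem.Str.splitMax? seg " " 1).getD []).getD 1 "")
           else seg))
  else if st.1 = none then (some seg, st.2.1, st.2.2)
  else st

def compact_detail_py (detail : String) (status : String) : String :=
  if detail = "" then ""
  else
    let segments := ((PySem.Str.split? detail ";").getD []).filterMap
      (fun seg => let t := PySem.Str.strip seg; if t = "" then none else some t)
    let st := segments.foldl pvStepA (none, none, none)
    let summary := st.1
    let fix := st.2.1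
    let elapsed := st.2.2
    let detail_text := if status ≠ "READY" ∧ fix.getD "" ≠ "" then fix else summary
    let parts : List String :=
      (if detail_text.getD "" ≠ "" then ["(" ++ detail_text.getD "" ++ ")"] else []) ++
      (if elapsed.getD "" ≠ "" then [elapsed.getD ""] else [])
    PySem.Str.strip (PySem.Str.join " " parts)

-- ===== PORT B =====
def pvIsFix (s : String) : Bool := PySem.Str.startswith (PySem.Str.lower s) "fix:"
def pvIsElapsed (s : String) : Bool := PySem.Str.startswith (PySem.Str.lower s) "elapsed"

def pvExtractFixB (s : String) : String :=
  PySem.Str.strip (((PySem.Str.splitMax? s ":" 1).getD []).getD 1 "")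

def pvExtractElapsedB (s : String) : String :=
  if PySem.Str.isIn " " s
  then PySem.Str.strip (((PySem.Str.splitMax? s " " 1).getD []).getD 1 "")
  else s

def compact_detail_py_alt (detail : String) (status : String) : String :=
  if detail = "" then ""
  else
    let segments := ((PySem.Str.split? detail ";").getD []).filterMap
      (fun seg => let t := PySem.Str.strip seg; if t = "" then none else some t)
    let fix := (segments.reverse.find? pvIsFix).map pvExtractFixB
    let elapsed := (segments.reverse.find? pvIsElapsed).map pvExtractElapsedB
    let summary := segments.find? (fun s => !pvIsFix s && !pvIsElapsed s)
    let detail_text := if status ≠ "READY" ∧ fix.getD "" ≠ "" then fix else summary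
    let parts : List String :=
      (if detail_text.getD "" ≠ "" then ["(" ++ detail_text.getD "" ++ ")"] else []) ++
      (if elapsed.getD "" ≠ "" then [elapsed.getD ""] else [])
    PySem.Str.strip (PySem.Str.join " " parts)

-- ===== PRECONDITION & SPEC =====
def Spec_compact_detail_py (detail : String) (status : String) (out : String) : Prop := out = compact_detail_py_alt detail status
instance (detail : String) (status : String) (out : String) : Decidable (Spec_compact_detail_py detail status out) := by unfold Spec_compact_detail_py; infer_instance

-- ===== CLAIM (what is proved, stated in full; the proofs are below) =====
def Claim_equal_compact_detail_py : Prop := ∀ (detail : String) (status : String), Dom_compact_detail_py detail status → Spec_compact_detail_py detail status (compact_detail_py detail status)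

-- ===== LEMMAS AND PROOFS =====

-- A's extraction in the fix branch, as a function (for relating the fold to find?)
def pvExtractFixA (seg : String) : String :=
  if PySem.Str.isIn ":" seg
  then PySem.Str.strip (((PySem.Str.splitMax? seg ":" 1).getD []).getD 1 "")
  else PySem.Str.strip (PySem.Str.slice seg (some 4) none)

lemma fix_prefix (s : String) (h : pvIsFix s = true) :
    ∃ t, List.map PySem.Chars.lowerChar s.toList = 'f' :: 'i' :: 'x' :: ':' :: t := by
  simp only [pvIsFix, PySem.Str.startswith_eq, PySem.Str.toList_lower,
    PySem.Chars.startswith_iff, PySem.Chars.lower] at h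
  obtain ⟨t, ht⟩ := h
  exact ⟨t, by rw [← ht]; rfl⟩

lemma elapsed_prefix (s : String) (h : pvIsElapsed s = true) :
    ∃ t, List.map PySem.Chars.lowerChar s.toList = 'e' :: 'l' :: 'a' :: 'p' :: 's' :: 'e' :: 'd' :: t := by
  simp only [pvIsElapsed, PySem.Str.startswith_eq, PySem.Str.toList_lower,
    PySem.Chars.startswith_iff, PySem.Chars.lower] at h
  obtain ⟨t, ht⟩ := h
  exact ⟨t, by rw [← ht]; rfl⟩

lemma isFix_not_isElapsed (s : String) (h : pvIsFix s = true) : pvIsElapsed s = false := by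
  by_contra hq
  rw [Bool.not_eq_false] at hq
  obtain ⟨t1, h1⟩ := fix_prefix s h
  obtain ⟨t2, h2⟩ := elapsed_prefix s hq
  rw [h1] at h2
  simp at h2

lemma lowerChar_colon (c : Char) (h : PySem.Chars.lowerChar c = ':') : c = ':' := by
  unfold PySem.Chars.lowerChar at h
  split_ifs at h with hu
  · exfalso
    simp only [PySem.Chars.isupper, Bool.and_eq_true, decide_eq_true_eq] at hu
    have h1 : ('A' : Char).toNat ≤ c.toNat := hu.1
    have h2 : c.toNat ≤ ('Z' : Char).toNat := hu.2
    have h3 := congrArg Char.toNat h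
    rw [Char.toNat_ofNat] at h3
    change 65 ≤ c.toNat at h1
    change c.toNat ≤ 90 at h2
    have hv : (c.toNat + 32).isValidChar := by
      simp only [Nat.isValidChar]
      left
      omega
    rw [if_pos hv] at h3
    change c.toNat + 32 = 58 at h3
    omega
  · exact h

lemma isFix_colon_mem (s : String) (h : pvIsFix s = true) : PySem.Str.isIn ":" s = true := by
  obtain ⟨t, ht⟩ := fix_prefix s h
  have hmem : ':' ∈ s.toList := by
    have : ':' ∈ List.map PySem.Chars.lowerChar s.toList := by rw [ht]; simp
    obtain ⟨c, hc, hlc⟩ := List.mem_map.mp this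
    exact (lowerChar_colon c hlc) ▸ hc
  rw [PySem.Str.isIn_eq, PySem.Chars.isIn_iff_infix]
  obtain ⟨pre, post, hsplit⟩ := List.append_of_mem hmem
  refine ⟨pre, post, ?_⟩
  rw [hsplit]
  show pre ++ [':'] ++ post = pre ++ ':' :: post
  simp

lemma extract_eq (s : String) (h : pvIsFix s = true) : pvExtractFixA s = pvExtractFixB s := by
  unfold pvExtractFixA pvExtractFixB
  rw [isFix_colon_mem s h]
  simp

lemma pv_or_map_some {α β : Type} (f : α → β) (x : Option α) (s : α) (y : Option β) :
    ((x.or (some s)).map f).or y = (x.map f).or (some (f s)) := by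
  cases x <;> simp

lemma pv_ite_or {α : Type} (su : Option α) (s : α) (z : Option α) :
    (if su = none then some s else su).or z = su.or (some s) := by
  cases su <;> simp

lemma foldA_spec (segs : List String) (su f e : Option String) :
    segs.foldl pvStepA (su, f, e) =
      (su.or (segs.find? (fun s => !pvIsFix s && !pvIsElapsed s)),
       ((segs.reverse.find? pvIsFix).map pvExtractFixA).or f,
       ((segs.reverse.find? pvIsElapsed).map pvExtractElapsedB).or e) := by
  induction segs generalizing su f e with
  | nil => simp
  | cons s rest ih =>
    rw [List.foldl_cons]
    by_cases hf : PySem.Str.startswith (PySem.Str.lower s) "fix:" = true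
    · have hf' : pvIsFix s = true := hf
      have he' : pvIsElapsed s = false := isFix_not_isElapsed s hf'
      have hstep : pvStepA (su, f, e) s = (su, some (pvExtractFixA s), e) := by
        unfold pvStepA pvExtractFixA
        rw [hf]
        simp
      have h1 := List.find?_cons_of_neg (l := rest) (a := s)
        (p := fun x => !pvIsFix x && !pvIsElapsed x) (by simp [hf'])
      have h2 : List.find? pvIsFix [s] = some s := by simp [hf']
      have h3 : List.find? pvIsElapsed [s] = none := by simp [he']
      rw [hstep, ih, List.reverse_cons, h1, List.find?_append, List.find?_append, h2, h3,
        Option.or_none, pv_or_map_some]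
    · by_cases he : PySem.Str.startswith (PySem.Str.lower s) "elapsed" = true
      · have he' : pvIsElapsed s = true := he
        have hf' : pvIsFix s = false := by rwa [Bool.not_eq_true] at hf
        have hstep : pvStepA (su, f, e) s = (su, f, some (pvExtractElapsedB s)) := by
          unfold pvStepA pvExtractElapsedB
          rw [Bool.not_eq_true] at hf
          rw [hf, he]
          simp
        have h1 := List.find?_cons_of_neg (l := rest) (a := s)
          (p := fun x => !pvIsFix x && !pvIsElapsed x) (by simp [he'])
        have h2 : List.find? pvIsFix [s] = none := by simp [hf']
        have h3 : List.find? pvIsElapsed [s] = some s := by simp [he']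
        rw [hstep, ih, List.reverse_cons, h1, List.find?_append, List.find?_append, h2, h3,
          Option.or_none, pv_or_map_some]
      · have hf' : pvIsFix s = false := by rwa [Bool.not_eq_true] at hf
        have he' : pvIsElapsed s = false := by rwa [Bool.not_eq_true] at he
        have hstep : pvStepA (su, f, e) s = (if su = none then some s else su, f, e) := by
          unfold pvStepA
          rw [Bool.not_eq_true] at hf he
          rw [hf, he]
          simp only [Bool.false_eq_true, if_false]
          split <;> rfl
        have h1 := List.find?_cons_of_pos (l := rest) (a := s)
          (p := fun x => !pvIsFix x && !pvIsElapsed x) (by simp [hf', he'])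
        have h2 : List.find? pvIsFix [s] = none := by simp [hf']
        have h3 : List.find? pvIsElapsed [s] = none := by simp [he']
        rw [hstep, ih, List.reverse_cons, h1, List.find?_append, List.find?_append, h2, h3,
          Option.or_none, Option.or_none, pv_ite_or]

lemma find?_map_extract (l : List String) :
    (l.find? pvIsFix).map pvExtractFixA = (l.find? pvIsFix).map pvExtractFixB := by
  rcases h : l.find? pvIsFix with _ | s
  · simp only [Option.map_none]
  · simp only [Option.map_some, extract_eq s (List.find?_some h)]

-- ===== VERDICT (by name: the statement is the Claim_ definition above) =====
theorem compact_detail_py_spec : Claim_equal_compact_detail_py := by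
  intro detail status _
  unfold Spec_compact_detail_py
  by_cases hd : detail = ""
  · subst hd; rfl
  · simp only [compact_detail_py, compact_detail_py_alt, hd, if_false,
      foldA_spec, find?_map_extract, Option.none_or, Option.or_none]
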